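-- pv_equiv track=rewrite | github.com/epifanovmd/gos | Материалы/Программирование/Алгоритмы/Дерево/tree.py | Zamena_str
-- ===== SOURCE A (Python) =====
-- def Zamena_str(ss):   #Замена вида rlr на right.left.right
--     k = ''
--     for i in range(0, len(ss)):
--         if ss[i] == 'r':
--             k += 'right.'
--         elif ss[i] == 'l':
--             k += 'left.'
--         else:
--             return "Error Input String!"
--     return k[:len(k)-1]
-- ===== SOURCE B (Python) =====
-- def Zamena_str(ss):
--     # Validate first, then map-and-join: no fused build loop, no trailing-dot strip.
--     if any(c not in 'rl' for c in ss):
--         return "Error Input String!"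
--     words = {'r': 'right', 'l': 'left'}
--     return '.'.join(words[c] for c in ss)
-- ===== Notes on version B (the rewrite author's own statement) =====
-- stated objective: idiomatic
-- what changed: A fuses validation and building in one loop, appending each dotted word and stripping the trailing dot with a slice; B validates the whole string first, then produces the result in a separate map-and-join pass (join over a dict of the two words), needing no trailing-separator strip.
import Mathlib
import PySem

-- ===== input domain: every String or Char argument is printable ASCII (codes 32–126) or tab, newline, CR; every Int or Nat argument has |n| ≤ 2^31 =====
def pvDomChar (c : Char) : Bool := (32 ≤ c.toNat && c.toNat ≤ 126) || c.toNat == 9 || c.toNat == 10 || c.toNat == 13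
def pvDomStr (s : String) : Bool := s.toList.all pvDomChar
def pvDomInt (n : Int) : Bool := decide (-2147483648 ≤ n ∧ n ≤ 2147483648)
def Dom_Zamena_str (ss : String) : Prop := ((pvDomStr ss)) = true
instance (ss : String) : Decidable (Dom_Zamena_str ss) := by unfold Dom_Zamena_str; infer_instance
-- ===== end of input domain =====

-- B validates the whole input first and then builds the result with a single map-and-join
-- ('.'.join needs no trailing-dot strip), instead of A's fused validate-and-build loop.

-- ===== PORT A =====
-- A's loop: build k by appending the dotted word for each char, early-return the error string on any
-- other char; at the end return k[:len(k)-1].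
def ZamenaA_go : List Char → List Char → Option (List Char)
| [], k => some k
| c :: rest, k =>
    if c = 'r' then ZamenaA_go rest (k ++ "right.".toList)
    else if c = 'l' then ZamenaA_go rest (k ++ "left.".toList)
    else none

def Zamena_str (ss : String) : String :=
  match ZamenaA_go ss.toList [] with
  | none => "Error Input String!"
  | some k => String.ofList (PySem.Chars.slice k none (some ((k.length : Int) - 1)))

-- ===== PORT B =====
def wordB (c : Char) : List Char := if c = 'r' then "right".toList else "left".toList

def Zamena_str_alt (ss : String) : String :=
  if ss.toList.any (fun c => !(c = 'r' || c = 'l')) then "Error Input String!"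
  else String.ofList (PySem.Chars.join ['.'] (ss.toList.map wordB))

-- ===== PRECONDITION & SPEC =====
def Spec_Zamena_str (ss : String) (out : String) : Prop := out = Zamena_str_alt ss
instance (ss : String) (out : String) : Decidable (Spec_Zamena_str ss out) := by unfold Spec_Zamena_str; infer_instance

-- ===== CLAIM (what is proved, stated in full; the proofs are below) =====
def Claim_equal_Zamena_str : Prop := ∀ (ss : String), Dom_Zamena_str ss → Spec_Zamena_str ss (Zamena_str ss)

-- ===== LEMMAS AND PROOFS =====

-- On an all-valid input A's loop returns the flattened dotted words appended to the accumulator.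
theorem ZamenaA_go_valid (cs : List Char) (k : List Char)
    (h : ∀ c ∈ cs, c = 'r' ∨ c = 'l') :
    ZamenaA_go cs k = some (k ++ (cs.map (fun c => wordB c ++ ['.'])).flatten) := by
  induction cs generalizing k with
  | nil => simp [ZamenaA_go]
  | cons c rest ih =>
    rcases h c (by simp) with hc | hc <;>
      simp [ZamenaA_go, hc, wordB, ih _ (fun d hd => h d (by simp [hd]))]

-- On an input with any invalid char A's loop returns none (the error branch).
theorem ZamenaA_go_invalid (cs : List Char) (k : List Char)
    (h : ¬ ∀ c ∈ cs, c = 'r' ∨ c = 'l') :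
    ZamenaA_go cs k = none := by
  induction cs generalizing k with
  | nil => exact absurd (by simp) h
  | cons c rest ih =>
    by_cases hc : c = 'r' ∨ c = 'l'
    · have hrest : ¬ ∀ d ∈ rest, d = 'r' ∨ d = 'l' := fun hr =>
        h (by intro d hd; rcases List.mem_cons.mp hd with rfl | hd; exact hc; exact hr d hd)
      rcases hc with hc | hc <;> simp [ZamenaA_go, hc, ih _ hrest]
    · push_neg at hc
      simp [ZamenaA_go, hc.1, hc.2]

-- Dropping the last char of the flattened dotted words gives the '.'-join of the words.
theorem dropLast_flatten_eq_join (cs : List Char) :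
    ((cs.map (fun c => wordB c ++ ['.'])).flatten).dropLast
      = PySem.Chars.join ['.'] (cs.map wordB) := by
  induction cs with
  | nil => simp [PySem.Chars.join_nil]
  | cons c rest ih =>
    cases rest with
    | nil => simp [PySem.Chars.join_singleton]
    | cons d rest' =>
      simp only [List.map_cons, List.flatten_cons, PySem.Chars.join_cons_cons]
      rw [List.dropLast_append_of_ne_nil (by simp)]
      simp only [List.map_cons, List.flatten_cons] at ih
      simpa using ih

-- A's final k[:len(k)-1] is dropLast (also for empty k, where the stop index is -1).
theorem slice_pred_eq_dropLast (k : List Char) :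
    PySem.Chars.slice k none (some ((k.length : Int) - 1)) = k.dropLast := by
  cases k with
  | nil => rfl
  | cons c rest =>
    rw [PySem.Chars.slice_eq_listSlice,
      show (((c :: rest).length : Int) - 1) = ((rest.length : Nat) : Int) by simp,
      PySem.List.slice_to _ (by positivity)]
    simp [List.dropLast_eq_take]

-- ===== VERDICT (by name: the statement is the Claim_ definition above) =====
theorem Zamena_str_spec : Claim_equal_Zamena_str := by
  intro ss _
  unfold Spec_Zamena_str Zamena_str Zamena_str_alt
  by_cases h : ∀ c ∈ ss.toList, c = 'r' ∨ c = 'l'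
  · have hany : ss.toList.any (fun c => !(c = 'r' || c = 'l')) = false := by
      simp only [List.any_eq_false]; intro c hc
      rcases h c hc with hc' | hc' <;> simp [hc']
    rw [ZamenaA_go_valid _ _ h]
    simp only [hany, Bool.false_eq_true, if_false, List.nil_append, slice_pred_eq_dropLast,
      dropLast_flatten_eq_join]
  · have hany : ss.toList.any (fun c => !(c = 'r' || c = 'l')) = true := by
      push_neg at h; obtain ⟨c, hc, h1, h2⟩ := h
      exact List.any_eq_true.mpr ⟨c, hc, by simp [h1, h2]⟩
    rw [ZamenaA_go_invalid _ _ h]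
    simp only [hany, if_true]
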